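-- pv_equiv track=rewrite | github.com/Sai5810/TJHSST-Artificial-Intelligence | Artificial Intelligence/Crossword/a7.py | find_ver
-- ===== SOURCE A (Python) =====
-- def find_ver(crossword, i, j, row):
--     i2 = i
--     front = []
--     while i2 >= 0 and crossword[i2][j] != '#':
--         front.append(crossword[i2][j])
--         i2 -= 1
--     start = i2 + 1
--     i2 = i + 1
--     back = []
--     while i2 < row and crossword[i2][j] != '#':
--         back.append(crossword[i2][j])
--         i2 += 1
--     return start, (''.join(front[::-1]) + ''.join(back))
-- ===== SOURCE B (Python) =====
-- def find_ver(crossword, i, j, row):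
--     # Walk a start pointer upward to the top boundary of the word segment.
--     start = i + 1
--     while start > 0 and crossword[start - 1][j] != '#':
--         start -= 1
--     # Build the whole word in one forward pass from start.
--     word = []
--     k = start
--     while k < row and crossword[k][j] != '#':
--         word.append(crossword[k][j])
--         k += 1
--     return start, ''.join(word)
-- ===== Notes on version B (the rewrite author's own statement) =====
-- stated objective: simpler
-- what changed: B walks a start pointer upward to the word's top boundary (collecting nothing), then builds the whole word in one forward pass from start, removing A's front list, its reversal and the double join.
-- outside the precondition, e.g. on find_ver(['ab'], -2, 0, 1): A returns (-1, 'aa'), B returns (-1, 'aa'); on find_ver(['a', 'b'], 1, 0, 1): A returns (0, 'ab'), B returns (0, 'a'); on find_ver(['ab', 'x'], 0, 1, 1): A returns (0, 'b'), B returns (0, 'b')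
import Mathlib
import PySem

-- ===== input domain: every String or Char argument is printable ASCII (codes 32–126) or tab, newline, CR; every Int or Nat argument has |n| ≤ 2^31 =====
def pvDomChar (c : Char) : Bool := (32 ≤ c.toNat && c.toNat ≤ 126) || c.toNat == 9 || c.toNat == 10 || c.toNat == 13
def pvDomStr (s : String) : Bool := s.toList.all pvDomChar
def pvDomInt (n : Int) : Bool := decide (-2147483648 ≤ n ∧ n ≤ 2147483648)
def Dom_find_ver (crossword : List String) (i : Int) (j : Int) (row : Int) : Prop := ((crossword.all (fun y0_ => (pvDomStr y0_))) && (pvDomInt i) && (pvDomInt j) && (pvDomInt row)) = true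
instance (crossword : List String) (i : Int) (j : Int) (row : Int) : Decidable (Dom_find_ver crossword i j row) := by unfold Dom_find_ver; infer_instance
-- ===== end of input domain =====

-- B walks a start pointer upward to the word's top boundary (collecting nothing), then builds
-- the whole word in one forward pass from start: no front list, no reversal, one join.

-- the cell crossword[r][j] with Python's indexing (negative = from the end); inside Pre_
-- every access made by either program is in range, so the ' ' default is never the value read
def pvCell (crossword : List String) (r : Int) (j : Int) : Char :=
  ((PySem.List.pyGet? crossword r).bind (fun s => PySem.List.pyGet? s.toList j)).getD ' '

-- ===== PORT A =====
-- A's upward loop: appends crossword[i2][j] while i2 ≥ 0 and ≠ '#'; fuel (i+1).toNat is exact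
def pvFrontA (crossword : List String) (j : Int) : Nat → Int → List Char → Int × List Char
  | 0, i2, acc => (i2, acc)
  | Nat.succ f, i2, acc =>
      if i2 ≥ 0 ∧ pvCell crossword i2 j ≠ '#' then
        pvFrontA crossword j f (i2 - 1) (acc ++ [pvCell crossword i2 j])
      else (i2, acc)

-- A's downward loop: appends while i2 < row and ≠ '#'; fuel (row - (i+1)).toNat is exact
def pvBackA (crossword : List String) (j : Int) (row : Int) : Nat → Int → List Char → List Char
  | 0, _, acc => acc
  | Nat.succ f, i2, acc =>
      if i2 < row ∧ pvCell crossword i2 j ≠ '#' then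
        pvBackA crossword j row f (i2 + 1) (acc ++ [pvCell crossword i2 j])
      else acc

def find_ver (crossword : List String) (i : Int) (j : Int) (row : Int) : Int × String :=
  let r := pvFrontA crossword j (i + 1).toNat i []
  let start := r.1 + 1
  let back := pvBackA crossword j row (row - (i + 1)).toNat (i + 1) []
  (start, String.ofList (r.2.reverse ++ back))

-- ===== PORT B =====
-- B's boundary walk: 'while start > 0 and crossword[start-1][j] != '#': start -= 1'
def pvStartB (crossword : List String) (j : Int) (s : Int) : Int :=
  if h : 0 < s ∧ pvCell crossword (s - 1) j ≠ '#' then pvStartB crossword j (s - 1) else s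
termination_by s.toNat
decreasing_by omega

-- B's single forward build: 'while k < row and crossword[k][j] != '#': word.append(…); k += 1'
def pvWordB (crossword : List String) (j : Int) (row : Int) (k : Int) : List Char :=
  if h : k < row ∧ pvCell crossword k j ≠ '#' then
    pvCell crossword k j :: pvWordB crossword j row (k + 1)
  else []
termination_by (row - k).toNat
decreasing_by omega

def find_ver_alt (crossword : List String) (i : Int) (j : Int) (row : Int) : Int × String :=
  let start := pvStartB crossword j (i + 1)
  (start, String.ofList (pvWordB crossword j row start))

-- ===== PRECONDITION & SPEC =====
-- Pre_ admits: no access at all (i < 0 and row ≤ i+1); a '#' at cell (i, j) with row ≤ i+1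
-- (both scans stop at once); and the normal shape -1 ≤ i < row ≤ len(crossword) with j in
-- range (Python's negative j included) for every row. It excludes i ≥ row with a word above
-- row — there row contradicts being the grid height and A's upward word is an accidental
-- corner — the i ≤ -2 row-index wraparound artefact, and shapes (row > len, rows shorter
-- than j) where freedom from IndexError depends on '#' placement; A raises IndexError on the rest.
def Pre_find_ver (crossword : List String) (i : Int) (j : Int) (row : Int) : Prop :=
  (i < 0 ∧ row ≤ i + 1) ∨
    (0 ≤ i ∧ i < (crossword.length : Int) ∧ row ≤ i + 1 ∧
      PySem.List.pyGet? (crossword.getD i.toNat "").toList j = some '#') ∨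
    (-1 ≤ i ∧ i < row ∧ row ≤ (crossword.length : Int) ∧
      ∀ s ∈ crossword, -(s.toList.length : Int) ≤ j ∧ j < (s.toList.length : Int))
instance (crossword : List String) (i : Int) (j : Int) (row : Int) : Decidable (Pre_find_ver crossword i j row) := by unfold Pre_find_ver; infer_instance

def pvWitness_find_ver : List String × Int × Int × Int := (["cat", "#a#", "dog"], 0, 0, 3)

def Spec_find_ver (crossword : List String) (i : Int) (j : Int) (row : Int) (out : Int × String) : Prop := out = find_ver_alt crossword i j row
instance (crossword : List String) (i : Int) (j : Int) (row : Int) (out : Int × String) : Decidable (Spec_find_ver crossword i j row out) := by unfold Spec_find_ver; infer_instance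

-- ===== CLAIM (what is proved, stated in full; the proofs are below) =====
def Claim_equal_find_ver : Prop := ∀ (crossword : List String) (i : Int) (j : Int) (row : Int), Dom_find_ver crossword i j row → Pre_find_ver crossword i j row → Spec_find_ver crossword i j row (find_ver crossword i j row)

-- ===== LEMMAS AND PROOFS =====

-- accumulator lemma for A's front loop
theorem pvFrontA_acc (crossword : List String) (j : Int) :
    ∀ (f : Nat) (i2 : Int) (acc : List Char),
      pvFrontA crossword j f i2 acc =
        ((pvFrontA crossword j f i2 []).1, acc ++ (pvFrontA crossword j f i2 []).2) := by
  intro f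
  induction f with
  | zero => intro i2 acc; simp [pvFrontA]
  | succ f ih =>
      intro i2 acc
      simp only [pvFrontA]
      split_ifs with h
      · rw [ih (i2 - 1) (acc ++ [pvCell crossword i2 j]), ih (i2 - 1) ([] ++ [pvCell crossword i2 j])]
        simp
      · simp

-- accumulator lemma for A's back loop
theorem pvBackA_acc (crossword : List String) (j row : Int) :
    ∀ (f : Nat) (i2 : Int) (acc : List Char),
      pvBackA crossword j row f i2 acc = acc ++ pvBackA crossword j row f i2 [] := by
  intro f
  induction f with
  | zero => intro i2 acc; simp [pvBackA]
  | succ f ih =>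
      intro i2 acc
      simp only [pvBackA]
      split_ifs with h
      · rw [ih (i2 + 1) (acc ++ [pvCell crossword i2 j]), ih (i2 + 1) ([] ++ [pvCell crossword i2 j])]
        simp
      · simp

-- B's boundary walk lands one past the index where A's front loop stops
theorem pvStartB_eq (crossword : List String) (j : Int) :
    ∀ (n : Nat) (i2 : Int), (i2 + 1).toNat = n →
      pvStartB crossword j (i2 + 1) = (pvFrontA crossword j n i2 []).1 + 1 := by
  intro n
  induction n with
  | zero =>
      intro i2 hn
      rw [pvStartB.eq_def]
      rw [dif_neg (by omega)]
      simp [pvFrontA]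
  | succ n ih =>
      intro i2 hn
      have h0 : (0 : Int) ≤ i2 := by omega
      have he : i2 + 1 - 1 = i2 := by ring
      rw [pvStartB.eq_def, he]
      simp only [pvFrontA]
      by_cases hc : pvCell crossword i2 j = '#'
      · rw [dif_neg (by simp [hc])]
        rw [if_neg (by simp [hc])]
      · rw [dif_pos ⟨by omega, hc⟩, if_pos ⟨h0, hc⟩, pvFrontA_acc]
        conv_lhs => rw [show i2 = (i2 - 1) + 1 from by ring]
        rw [ih (i2 - 1) (by omega)]

-- B's forward build equals A's back loop with empty accumulator
theorem pvWordB_eq_backA (crossword : List String) (j row : Int) :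
    ∀ (n : Nat) (k : Int), (row - k).toNat = n →
      pvWordB crossword j row k = pvBackA crossword j row n k [] := by
  intro n
  induction n with
  | zero =>
      intro k hn
      rw [pvWordB.eq_def, dif_neg (by omega)]
      simp [pvBackA]
  | succ n ih =>
      intro k hn
      have hk : k < row := by omega
      rw [pvWordB.eq_def]
      simp only [pvBackA]
      by_cases hc : pvCell crossword k j = '#'
      · rw [dif_neg (by simp [hc]), if_neg (by simp [hc])]
      · rw [dif_pos ⟨hk, hc⟩, if_pos ⟨hk, hc⟩]
        rw [pvBackA_acc, ih (k + 1) (by omega)]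
        simp

-- main invariant: B's forward build from the boundary equals A's reversed front plus A's back
theorem pvMain (crossword : List String) (j row : Int) :
    ∀ (n : Nat) (i2 : Int), (i2 + 1).toNat = n → i2 < row →
      pvWordB crossword j row (pvStartB crossword j (i2 + 1)) =
        (pvFrontA crossword j n i2 []).2.reverse ++
          pvBackA crossword j row (row - (i2 + 1)).toNat (i2 + 1) [] := by
  intro n
  induction n with
  | zero =>
      intro i2 hn _
      rw [pvStartB.eq_def, dif_neg (by omega)]
      simp only [pvFrontA, List.reverse_nil, List.nil_append]
      exact pvWordB_eq_backA crossword j row _ _ rfl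
  | succ n ih =>
      intro i2 hn hlt
      have he : i2 + 1 - 1 = i2 := by ring
      rw [pvStartB.eq_def, he]
      simp only [pvFrontA]
      by_cases hc : pvCell crossword i2 j = '#'
      · rw [dif_neg (by simp [hc]), if_neg (by simp [hc])]
        simp only [List.reverse_nil, List.nil_append]
        exact pvWordB_eq_backA crossword j row _ _ rfl
      · have h0 : (0 : Int) ≤ i2 := by omega
        rw [dif_pos ⟨by omega, hc⟩, if_pos ⟨h0, hc⟩, pvFrontA_acc]
        have hih := ih (i2 - 1) (by omega) (by omega)
        rw [show i2 - 1 + 1 = i2 from by ring] at hih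
        have hfuel : (row - i2).toNat = (row - (i2 + 1)).toNat + 1 := by omega
        rw [hih, hfuel]
        -- unfold one step of A's back loop at i2 (fuel (row - i2).toNat)
        simp only [pvBackA]
        rw [if_pos ⟨hlt, hc⟩, pvBackA_acc]
        simp

-- ===== VERDICT (by name: the statement is the Claim_ definition above) =====
theorem find_ver_spec : Claim_equal_find_ver := by
  intro crossword i j row _ hpre
  simp only [Spec_find_ver, find_ver, find_ver_alt]
  rcases hpre with ⟨hi, hrow⟩ | ⟨h0, hl, hrow, hcell⟩ | ⟨_, hir, _, _⟩
  · -- i < 0 and row ≤ i + 1: both loops run zero times in both programs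
    have h1 : (i + 1).toNat = 0 := by omega
    have h2 : (row - (i + 1)).toNat = 0 := by omega
    rw [pvStartB.eq_def, dif_neg (by omega), pvWordB.eq_def, dif_neg (by omega)]
    simp [h1, h2, pvFrontA, pvBackA]
  · -- '#' at cell (i, j) and row ≤ i + 1: both scans stop immediately in both programs
    have hln : i.toNat < crossword.length := by omega
    have hc : pvCell crossword i j = '#' := by
      rw [List.getD_eq_getElem?_getD, List.getElem?_eq_getElem hln] at hcell
      simp [pvCell, PySem.List.pyGet?_of_nonneg _ h0, List.getElem?_eq_getElem hln,
        Option.getD_some] at hcell ⊢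
      simp [hcell]
    have h1 : (i + 1).toNat = i.toNat + 1 := by omega
    have h2 : (row - (i + 1)).toNat = 0 := by omega
    have he : i + 1 - 1 = i := by ring
    rw [pvStartB.eq_def, he, dif_neg (by simp [hc]), pvWordB.eq_def, dif_neg (by omega)]
    simp [h1, h2, pvFrontA, pvBackA, hc]
  · -- the normal shape: i < row
    have hfst := pvStartB_eq crossword j (i + 1).toNat i rfl
    have hmain := pvMain crossword j row (i + 1).toNat i rfl hir
    rw [hmain, hfst]
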